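-- pv_equiv track=rewrite | github.com/AliceInWonderland61/spring2025-python | Week4/week-4-S1-P2.py | simulate_meme_reposts
-- ===== SOURCE A (Python) =====
-- def simulate_meme_reposts(memes, reposts):
--     #so we have memes and reposts
--     #could we just make a new list
--     #actually when we traverse, we just look at the reposts and add those to the end of the list and the loop won't end until
--     #all reposts are 0
--     from collections import deque
--     queue = deque()
--
--     for i in range(len(memes)):
--         queue.append((memes[i], reposts[i]))
--
--     final_order = []
--
--     while queue:
--         meme, count = queue.popleft()
--         final_order.append(meme)
--
--         if count > 1:
--             queue.append((meme, count - 1))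
--
--     return final_order
-- ===== SOURCE B (Python) =====
-- def simulate_meme_reposts(memes, reposts):
--     n = len(memes)
--     rounds = 0
--     for i in range(n):
--         rounds = max(rounds, max(reposts[i], 1))
--     out = []
--     for r in range(rounds):
--         for i in range(n):
--             if r < max(reposts[i], 1):
--                 out.append(memes[i])
--     return out
-- ===== Notes on version B (the rewrite author's own statement) =====
-- stated objective: simpler
-- what changed: Replaces the deque-based requeueing simulation with a direct construction: compute the number of rounds as the maximum of max(reposts[i],1) and emit, round by round, every meme still due an appearance.
import Mathlib
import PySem

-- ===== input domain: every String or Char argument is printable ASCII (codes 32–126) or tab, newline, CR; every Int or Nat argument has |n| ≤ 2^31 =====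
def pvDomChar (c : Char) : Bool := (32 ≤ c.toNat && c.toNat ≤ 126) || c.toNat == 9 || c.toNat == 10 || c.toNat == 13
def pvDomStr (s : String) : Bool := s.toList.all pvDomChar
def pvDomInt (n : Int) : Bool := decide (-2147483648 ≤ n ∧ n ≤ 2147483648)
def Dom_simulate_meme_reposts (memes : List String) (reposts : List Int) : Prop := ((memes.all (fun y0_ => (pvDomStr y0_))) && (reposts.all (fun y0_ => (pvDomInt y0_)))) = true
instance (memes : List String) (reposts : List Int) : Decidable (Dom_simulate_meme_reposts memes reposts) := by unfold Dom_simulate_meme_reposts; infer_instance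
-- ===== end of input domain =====

-- B drops A's deque simulation: it computes the round count max(reposts[i],1) and emits the memes round by round directly.


-- ===== PORT A =====
-- the 'while queue:' loop of A: pop left, append the meme, requeue with count-1 when count > 1
def pvALoop : List (String × Int) → List String → List String
  | [], final_order => final_order
  | (meme, count) :: rest, final_order =>
      if count > 1 then pvALoop (rest ++ [(meme, count - 1)]) (final_order ++ [meme])
      else pvALoop rest (final_order ++ [meme])
termination_by q _ => (q.map (fun e => (max e.2 1).toNat)).sum
decreasing_by
  · simp only [List.map_append, List.sum_append, List.map_cons, List.sum_cons, List.map_nil,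
      List.sum_nil]
    omega
  · simp only [List.map_cons, List.sum_cons]
    omega

def simulate_meme_reposts (memes : List String) (reposts : List Int) : List String :=
  let queue := (PySem.List.pyRange 0 (memes.length : Int) 1).foldl
    (fun q i => q ++ [(PySem.List.pyGetD memes i "", PySem.List.pyGetD reposts i 0)]) []
  pvALoop queue []

-- ===== PORT B =====
def simulate_meme_reposts_alt (memes : List String) (reposts : List Int) : List String :=
  let n : Int := (memes.length : Int)
  let rounds := (PySem.List.pyRange 0 n 1).foldl
    (fun rounds i => max rounds (max (PySem.List.pyGetD reposts i 0) 1)) 0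
  (PySem.List.pyRange 0 rounds 1).foldl (fun out r =>
    (PySem.List.pyRange 0 n 1).foldl (fun out i =>
      if r < max (PySem.List.pyGetD reposts i 0) 1 then out ++ [PySem.List.pyGetD memes i ""]
      else out) out) []

-- ===== PRECONDITION & SPEC =====
-- A indexes reposts[i] for every i < len(memes): it raises IndexError iff len(reposts) < len(memes).
def Pre_simulate_meme_reposts (memes : List String) (reposts : List Int) : Prop :=
  memes.length ≤ reposts.length
instance (memes : List String) (reposts : List Int) : Decidable (Pre_simulate_meme_reposts memes reposts) := by unfold Pre_simulate_meme_reposts; infer_instance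
def pvWitness_simulate_meme_reposts : List String × List Int := (["lol", "cat"], [2, 1])

def Spec_simulate_meme_reposts (memes : List String) (reposts : List Int) (out : List String) : Prop := out = simulate_meme_reposts_alt memes reposts
instance (memes : List String) (reposts : List Int) (out : List String) : Decidable (Spec_simulate_meme_reposts memes reposts out) := by unfold Spec_simulate_meme_reposts; infer_instance

-- ===== CLAIM (what is proved, stated in full; the proofs are below) =====
def Claim_equal_simulate_meme_reposts : Prop := ∀ (memes : List String) (reposts : List Int), Dom_simulate_meme_reposts memes reposts → Pre_simulate_meme_reposts memes reposts → Spec_simulate_meme_reposts memes reposts (simulate_meme_reposts memes reposts)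

-- ===== LEMMAS AND PROOFS =====

-- one round of A's loop: the survivors (count > 1, decremented) of a processed prefix
def pvSurv (q : List (String × Int)) : List (String × Int) :=
  q.filterMap (fun e => if e.2 > 1 then some (e.1, e.2 - 1) else none)

def pvMu (q : List (String × Int)) : Nat := (q.map (fun e => (max e.2 1).toNat)).sum

def pvMaxC (q : List (String × Int)) : Int :=
  q.foldl (fun acc e => max acc (max e.2 1)) 0

-- one round of B's construction at round index r
def pvInner (r : Int) (out : List String) (e : String × Int) : List String :=
  if r < max e.2 1 then out ++ [e.1] else out

def pvRounds (R : Int) (q : List (String × Int)) : List String :=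
  (PySem.List.pyRange 0 R 1).foldl (fun out r => q.foldl (pvInner r) out) []

theorem pvALoop_round (q₁ : List (String × Int)) : ∀ (q₂ : List (String × Int)) (acc : List String),
    pvALoop (q₁ ++ q₂) acc = pvALoop (q₂ ++ pvSurv q₁) (acc ++ q₁.map Prod.fst) := by
  induction q₁ with
  | nil => intro q₂ acc; simp [pvSurv]
  | cons e t ih =>
    intro q₂ acc
    obtain ⟨m, c⟩ := e
    by_cases h : c > 1
    · rw [List.cons_append, pvALoop, if_pos h, List.append_assoc, ih (q₂ ++ [(m, c - 1)])]
      simp [pvSurv, h]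
    · rw [List.cons_append, pvALoop, if_neg h, ih q₂]
      simp [pvSurv, h]

theorem pvALoop_step (q : List (String × Int)) (acc : List String) :
    pvALoop q acc = pvALoop (pvSurv q) (acc ++ q.map Prod.fst) := by
  have := pvALoop_round q [] acc
  simpa using this

theorem pvMu_surv_le (q : List (String × Int)) : pvMu (pvSurv q) ≤ pvMu q := by
  induction q with
  | nil => simp [pvSurv, pvMu]
  | cons e t ih =>
    by_cases h : e.2 > 1 <;>
      simp [pvSurv, pvMu, h] at * <;> omega

theorem pvMu_surv_lt (q : List (String × Int)) (h : q ≠ []) : pvMu (pvSurv q) < pvMu q := by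
  obtain ⟨e, t, rfl⟩ := List.exists_cons_of_ne_nil h
  have := pvMu_surv_le t
  by_cases h2 : e.2 > 1 <;>
    simp [pvSurv, pvMu, h2] at * <;> omega

theorem pvMaxC_ub (q : List (String × Int)) : ∀ e ∈ q, max e.2 1 ≤ pvMaxC q :=
  (PySem.List.le_foldl_max_int q (fun e => max e.2 1) 0).2

theorem pvMaxC_nonneg (q : List (String × Int)) : 0 ≤ pvMaxC q :=
  (PySem.List.le_foldl_max_int q (fun e => max e.2 1) 0).1

theorem pvMaxC_pos (q : List (String × Int)) (h : q ≠ []) : 1 ≤ pvMaxC q := by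
  obtain ⟨e, t, rfl⟩ := List.exists_cons_of_ne_nil h
  have := pvMaxC_ub (e :: t) e (by simp)
  omega

theorem pvMaxC_attain (q : List (String × Int)) :
    pvMaxC q = 0 ∨ ∃ e ∈ q, pvMaxC q = max e.2 1 := by
  have hmap : pvMaxC q = (q.map (fun e => max e.2 1)).foldl max 0 := by
    simp [pvMaxC, List.foldl_map]
  rcases PySem.List.foldl_max_mem (q.map (fun e => max e.2 1)) 0 with h | h
  · left; rw [hmap, h]
  · right
    rw [hmap]
    obtain ⟨e, he, hv⟩ := List.mem_map.1 h
    exact ⟨e, he, hv.symm⟩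

theorem pvMaxC_surv (q : List (String × Int)) (h : q ≠ []) :
    pvMaxC (pvSurv q) = pvMaxC q - 1 := by
  have hub : ∀ e' ∈ pvSurv q, max e'.2 1 ≤ pvMaxC q - 1 := by
    intro e' he'
    simp only [pvSurv, List.mem_filterMap] at he'
    obtain ⟨e, he, hstep⟩ := he'
    by_cases h2 : e.2 > 1
    · rw [if_pos h2] at hstep
      have := pvMaxC_ub q e he
      cases hstep
      simp only
      omega
    · rw [if_neg h2] at hstep; exact absurd hstep (by simp)
  have hpos := pvMaxC_pos q h
  have hle : pvMaxC (pvSurv q) ≤ pvMaxC q - 1 := by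
    rcases pvMaxC_attain (pvSurv q) with h0 | ⟨e', he', hv⟩
    · omega
    · rw [hv]; exact hub e' he'
  have hge : pvMaxC q - 1 ≤ pvMaxC (pvSurv q) := by
    by_cases h2 : pvMaxC q = 1
    · have := pvMaxC_nonneg (pvSurv q); omega
    · rcases pvMaxC_attain q with h0 | ⟨e, he, hv⟩
      · omega
      · have he2 : e.2 = pvMaxC q := by omega
        have hmem : (e.1, e.2 - 1) ∈ pvSurv q := by
          simp only [pvSurv, List.mem_filterMap]
          exact ⟨e, he, by rw [if_pos (by omega)]⟩
        have := pvMaxC_ub (pvSurv q) (e.1, e.2 - 1) hmem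
        simp only at this
        omega
  omega

theorem pvInner_shift (q : List (String × Int)) : ∀ (r : Int), 1 ≤ r → ∀ out : List String,
    q.foldl (pvInner r) out = (pvSurv q).foldl (pvInner (r - 1)) out := by
  induction q with
  | nil => intro r _ out; simp [pvSurv]
  | cons e t ih =>
    intro r hr out
    by_cases h2 : e.2 > 1
    · have heq : pvInner r out e = pvInner (r - 1) out (e.1, e.2 - 1) := by
        unfold pvInner
        by_cases ha : r < max e.2 1
        · rw [if_pos ha, if_pos (show r - 1 < max ((e.1, e.2 - 1)).2 1 by simp only; omega)]
        · rw [if_neg ha, if_neg (show ¬ r - 1 < max ((e.1, e.2 - 1)).2 1 by simp only; omega)]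
      simp only [pvSurv, List.filterMap_cons, if_pos h2, List.foldl_cons, heq]
      exact ih r hr _
    · have heq : pvInner r out e = out := by
        unfold pvInner; rw [if_neg (show ¬ r < max e.2 1 by omega)]
      simp only [pvSurv, List.filterMap_cons, if_neg h2, List.foldl_cons, heq]
      exact ih r hr out

theorem pvInner_foldl (q : List (String × Int)) (r : Int) (out : List String) :
    q.foldl (pvInner r) out = out ++ (q.filter (fun e => decide (r < max e.2 1))).map Prod.fst :=
  PySem.List.foldl_append_ite (p := fun e : String × Int => r < max e.2 1) (f := Prod.fst) q out

theorem pvRounds_flat (R : Int) (q : List (String × Int)) :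
    pvRounds R q = (PySem.List.pyRange 0 R 1).flatMap
      (fun r => (q.filter (fun e => decide (r < max e.2 1))).map Prod.fst) := by
  unfold pvRounds
  have hfun : (fun (out : List String) (r : Int) => q.foldl (pvInner r) out) =
      (fun out r => out ++ (q.filter (fun e => decide (r < max e.2 1))).map Prod.fst) := by
    funext out r; exact pvInner_foldl q r out
  rw [hfun, PySem.List.foldl_append_eq_flatMap]
  simp

theorem pvRounds_peel (q : List (String × Int)) (R : Int) (hR : 1 ≤ R) :
    pvRounds R q = q.map Prod.fst ++ pvRounds (R - 1) (pvSurv q) := by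
  have hpoint : ∀ r : Int, 1 ≤ r →
      (q.filter (fun e => decide (r < max e.2 1))).map Prod.fst =
      ((pvSurv q).filter (fun e => decide (r - 1 < max e.2 1))).map Prod.fst := by
    intro r hr
    have h := pvInner_shift q r hr []
    rwa [pvInner_foldl, pvInner_foldl, List.nil_append, List.nil_append] at h
  rw [pvRounds_flat, pvRounds_flat]
  rw [PySem.List.pyRange_one_cons (by omega : (0:Int) < R), List.flatMap_cons]
  have hzero : (q.filter (fun e => decide ((0:Int) < max e.2 1))).map Prod.fst = q.map Prod.fst := by
    congr 1
    apply List.filter_eq_self.mpr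
    intro e _
    simp only [decide_eq_true_eq]
    omega
  rw [hzero]
  congr 1
  have h1 := PySem.List.pyRange_one 1 R
  have h0 := PySem.List.pyRange_one 0 (R - 1)
  simp only [zero_add] at h1 h0 ⊢
  rw [h1, h0, List.flatMap_map, List.flatMap_map]
  have hsub : R - 1 - 0 = R - 1 := by omega
  rw [hsub]
  apply List.flatMap_congr
  intro k _
  have := hpoint (1 + (k : Int)) (by omega)
  simpa using this

theorem pvALoop_eq_rounds (n : Nat) : ∀ (q : List (String × Int)) (acc : List String),
    pvMu q = n → pvALoop q acc = acc ++ pvRounds (pvMaxC q) q := by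
  induction n using Nat.strong_induction_on with
  | _ n ih =>
    intro q acc hn
    match q with
    | [] => simp [pvALoop, pvRounds, pvMaxC, PySem.List.pyRange_one_eq_nil]
    | e :: t =>
      have hne : (e :: t : List (String × Int)) ≠ [] := by simp
      rw [pvALoop_step]
      rw [ih (pvMu (pvSurv (e :: t))) (by rw [← hn]; exact pvMu_surv_lt _ hne) _ _ rfl]
      rw [pvMaxC_surv _ hne,
        pvRounds_peel (e :: t) (pvMaxC (e :: t)) (pvMaxC_pos _ hne), ← List.append_assoc]

-- ===== VERDICT (by name: the statement is the Claim_ definition above) =====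
theorem simulate_meme_reposts_spec : Claim_equal_simulate_meme_reposts := by
  intro memes reposts _dom _pre
  unfold Spec_simulate_meme_reposts simulate_meme_reposts simulate_meme_reposts_alt
  rw [PySem.List.foldl_append_singleton_eq_map
    (f := fun i => (PySem.List.pyGetD memes i "", PySem.List.pyGetD reposts i 0))]
  simp only [List.nil_append]
  set q0 := (PySem.List.pyRange 0 (memes.length : Int) 1).map
    (fun i => (PySem.List.pyGetD memes i "", PySem.List.pyGetD reposts i 0)) with hq0
  rw [pvALoop_eq_rounds (pvMu q0) q0 [] rfl]
  have hmax : pvMaxC q0 = (PySem.List.pyRange 0 (memes.length : Int) 1).foldl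
      (fun rounds i => max rounds (max (PySem.List.pyGetD reposts i 0) 1)) 0 := by
    rw [hq0]; rw [pvMaxC, List.foldl_map]
  rw [List.nil_append, hmax]
  rw [pvRounds]
  congr 1
  funext out r
  rw [hq0, List.foldl_map]
  rfl
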